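-- pv_equiv track=rewrite | github.com/724thomas/CodingChallenge_Python | baekjoon/7567.py | solution
-- ===== SOURCE A (Python) =====
-- def solution(s):
--     ans = 0
--     dir = ""
--     for b in s:
--         if b == dir:
--             ans += 5
--         else:
--             ans += 10
--             dir = b
--
--     return ans
-- ===== SOURCE B (Python) =====
-- def solution(s):
--     # Divide and conquer: a block [i, j) of characters scores 10 per character,
--     # minus a 5 discount at every adjacent equal pair; each adjacent pair is
--     # accounted for exactly once, at the merge boundary of the halves.
--     def go(i, j):
--         if j - i <= 1:
--             return 10 * (j - i)
--         m = (i + j) // 2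
--         return go(i, m) + go(m, j) - (5 if s[m - 1] == s[m] else 0)
--     return go(0, len(s))
-- ===== Notes on version B (the rewrite author's own statement) =====
-- stated objective: alternative
-- what changed: Replaces A's stateful left-to-right scan (tracking the previous direction and adding 5 or 10) with a divide-and-conquer recursion: each half is scored independently (10 per character) and a 5 discount is applied for the adjacent equal pair at each merge boundary.
import Mathlib
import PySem

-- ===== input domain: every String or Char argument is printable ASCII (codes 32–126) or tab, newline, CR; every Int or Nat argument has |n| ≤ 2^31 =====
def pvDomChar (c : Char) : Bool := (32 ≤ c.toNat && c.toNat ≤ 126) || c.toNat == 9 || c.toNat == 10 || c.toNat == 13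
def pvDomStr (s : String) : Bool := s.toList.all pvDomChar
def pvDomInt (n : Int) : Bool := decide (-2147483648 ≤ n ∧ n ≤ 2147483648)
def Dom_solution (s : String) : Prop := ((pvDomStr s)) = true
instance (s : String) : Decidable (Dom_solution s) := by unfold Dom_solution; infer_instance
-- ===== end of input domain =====

-- B scores by divide and conquer (10 per char, a 5 discount at each merge boundary whose adjacent chars are equal)
-- instead of A's stateful left-to-right scan; an alternative of the same O(n) cost.
-- ===== PORT A =====
-- dir is "" then single-char strings in Python; Option Char models it exactly (none never equals some b)
def solution (s : String) : Int :=
  (s.toList.foldl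
    (fun (st : Int × Option Char) b =>
      if some b = st.2 then (st.1 + 5, st.2) else (st.1 + 10, some b))
    (0, none)).1

-- ===== PORT B =====
-- go(i, j) of Source B operates on the index range [i, j) of s; here the sublist l stands for that
-- range, so go(i, m)/go(m, j) become dnc (l.take m)/dnc (l.drop m), and s[m-1], s[m] become
-- l[m-1]?, l[m]? (both indices are in range, so the Option comparison is exact).
def dnc (l : List Char) : Int :=
  if l.length ≤ 1 then 10 * l.length
  else
    let m := l.length / 2
    dnc (l.take m) + dnc (l.drop m) - (if l[m-1]? = l[m]? then 5 else 0)
termination_by l.length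
decreasing_by
  · simp only [List.length_take]; omega
  · simp only [List.length_drop]; omega

def solution_alt (s : String) : Int := dnc s.toList

-- ===== PRECONDITION & SPEC =====
def Spec_solution (s : String) (out : Int) : Prop := out = solution_alt s
instance (s : String) (out : Int) : Decidable (Spec_solution s out) := by unfold Spec_solution; infer_instance

-- ===== CLAIM (what is proved, stated in full; the proofs are below) =====
def Claim_equal_solution : Prop := ∀ (s : String), Dom_solution s → Spec_solution s (solution s)

-- ===== LEMMAS AND PROOFS =====
-- number of adjacent equal pairs
def adjEq : List Char → Int
  | a :: b :: t => (if a = b then 1 else 0) + adjEq (b :: t)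
  | _ => 0

def fstep (st : Int × Option Char) (b : Char) : Int × Option Char :=
  if some b = st.2 then (st.1 + 5, st.2) else (st.1 + 10, some b)

-- matches of each element against its predecessor, seeded with prev
def matchCount (prev : Option Char) : List Char → Int
  | [] => 0
  | b :: t => (if some b = prev then 1 else 0) + matchCount (some b) t

theorem foldl_fstep (l : List Char) : ∀ (acc : Int) (prev : Option Char),
    (l.foldl fstep (acc, prev)).1 = acc + 10 * l.length - 5 * matchCount prev l := by
  induction l with
  | nil => intro acc prev; simp [matchCount]
  | cons b t ih =>
    intro acc prev
    simp only [List.foldl_cons, fstep, matchCount]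
    by_cases h : some b = prev
    · simp [h, ih]; ring
    · simp [h, ih]; ring

theorem matchCount_some (l : List Char) : ∀ (p : Char), matchCount (some p) l = adjEq (p :: l) := by
  induction l with
  | nil => intro p; simp [matchCount, adjEq]
  | cons b t ih =>
    intro p
    simp only [matchCount, adjEq, ih]
    by_cases h : b = p
    · simp [h]
    · simp [h, Ne.symm h]

theorem matchCount_none (l : List Char) : matchCount none l = adjEq l := by
  cases l with
  | nil => simp [matchCount, adjEq]
  | cons a t => simp [matchCount, matchCount_some]

theorem adjEq_append (u v : List Char) (hu : u ≠ []) (hv : v ≠ []) :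
    adjEq (u ++ v) = adjEq u + adjEq v + (if u.getLast? = v.head? then 1 else 0) := by
  induction u with
  | nil => exact absurd rfl hu
  | cons a t ih =>
    cases t with
    | nil =>
      cases v with
      | nil => exact absurd rfl hv
      | cons y w => simp [adjEq]; by_cases h : a = y <;> simp [h] <;> try ring
    | cons b t' =>
      have h1 : (b :: t') ≠ [] := by simp
      have : adjEq ((a :: b :: t') ++ v) = (if a = b then 1 else 0) + adjEq ((b :: t') ++ v) := by
        simp [adjEq]
      rw [this, ih h1]
      simp [adjEq, List.getLast?_cons_cons]
      ring

theorem dnc_eq (n : ℕ) : ∀ (l : List Char), l.length = n → dnc l = 10 * l.length - 5 * adjEq l := by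
  induction n using Nat.strong_induction_on with
  | _ n ih =>
    intro l hn
    rw [dnc]
    by_cases h : l.length ≤ 1
    · have : adjEq l = 0 := by
        match l, h with
        | [], _ => rfl
        | [a], _ => rfl
      simp [h, this]
    · simp only [h, if_false]
      have hlen : 2 ≤ l.length := by omega
      set m := l.length / 2 with hm
      have hm1 : 1 ≤ m := by omega
      have hmlt : m < l.length := by omega
      have htake : (l.take m).length = m := by simp; omega
      have hdrop : (l.drop m).length = l.length - m := by simp
      rw [ih (l.take m).length (by omega) _ rfl, ih (l.drop m).length (by omega) _ rfl]
      have hne1 : l.take m ≠ [] := by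
        intro h'; have := congrArg List.length h'; simp [htake] at this; omega
      have hne2 : l.drop m ≠ [] := by
        intro h'; have := congrArg List.length h'; simp [hdrop] at this; omega
      have hlast : (l.take m).getLast? = l[m-1]? := by
        rw [List.getLast?_eq_getElem?, htake]
        rw [List.getElem?_take]
        simp [show m - 1 < m by omega]
      have hhead : (l.drop m).head? = l[m]? := by
        rw [List.head?_drop]
      have := adjEq_append (l.take m) (l.drop m) hne1 hne2
      rw [List.take_append_drop] at this
      rw [hlast, hhead] at this
      rw [this, htake, hdrop]
      by_cases hb : l[m-1]? = l[m]? <;> simp [hb] <;> ring_nf <;> omega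

-- ===== VERDICT (by name: the statement is the Claim_ definition above) =====
theorem solution_spec : Claim_equal_solution := by
  intro s _
  unfold Spec_solution solution solution_alt
  show ((s.toList.foldl fstep (0, none)).1) = _
  rw [foldl_fstep, matchCount_none, dnc_eq s.toList.length _ rfl]
  ring
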